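-- pv_equiv track=rewrite | github.com/martintosney/aoc-2023 | day09/main.py | build_ext_pyramid
-- ===== SOURCE A (Python) =====
-- def build_ext_pyramid(number_list):
--     if len([d for d in number_list if d != 0]) == 0:
--         return [number_list + [0]]
--     else:
--         next_list = [r - l for l, r in zip(number_list[:-1], number_list[1:])]
--         sub_lists = build_ext_pyramid(next_list)
--         next_value = number_list[-1] + sub_lists[0][-1]
--         return [number_list + [next_value]] + sub_lists
-- ===== SOURCE B (Python) =====
-- def build_ext_pyramid(number_list):
--     # Phase 1: build the difference pyramid iteratively, top row first.
--     rows = [number_list]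
--     while any(d != 0 for d in rows[-1]):
--         cur = rows[-1]
--         rows.append([b - a for a, b in zip(cur, cur[1:])])
--     # Phase 2: walk bottom-up, accumulating the extrapolated last value.
--     out = [rows[-1] + [0]]
--     acc = 0
--     for row in reversed(rows[:-1]):
--         acc = row[-1] + acc
--         out.append(row + [acc])
--     out.reverse()
--     return out
-- ===== Notes on version B (the rewrite author's own statement) =====
-- stated objective: alternative
-- what changed: Replaces A's recursion (each level recursing on the difference row and prepending via list concatenation) with an explicit two-phase iteration: first build all pyramid rows top-down in a while loop, then walk them bottom-up with an accumulator to attach the extrapolated values.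
import Mathlib
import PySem

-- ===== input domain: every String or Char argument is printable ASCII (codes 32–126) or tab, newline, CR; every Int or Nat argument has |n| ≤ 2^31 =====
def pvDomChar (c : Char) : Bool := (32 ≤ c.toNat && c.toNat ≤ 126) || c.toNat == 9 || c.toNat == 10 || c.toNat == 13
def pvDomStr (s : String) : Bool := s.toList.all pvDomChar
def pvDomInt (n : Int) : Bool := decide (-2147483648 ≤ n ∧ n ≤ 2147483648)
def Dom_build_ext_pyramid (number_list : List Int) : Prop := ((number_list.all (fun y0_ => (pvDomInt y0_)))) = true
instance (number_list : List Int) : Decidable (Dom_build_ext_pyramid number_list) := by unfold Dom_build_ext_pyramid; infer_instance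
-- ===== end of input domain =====

-- B: iterative two-phase re-implementation (build all rows, then extrapolate bottom-up) replacing A's recursion; same return values.
-- ===== PORT A =====
def build_ext_pyramid (number_list : List Int) : List (List Int) :=
  if (number_list.filter (fun d => d ≠ 0)).length = 0 then
    [number_list ++ [0]]
  else
    let next_list := (number_list.dropLast.zip number_list.tail).map (fun p => p.2 - p.1)
    let sub_lists := build_ext_pyramid next_list
    let next_value := number_list.getLast! + sub_lists.head!.getLast!
    (number_list ++ [next_value]) :: sub_lists
termination_by number_list.length
decreasing_by
  simp only [List.length_map, List.length_zip, List.length_dropLast, List.length_tail]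
  rcases number_list with _ | ⟨a, t⟩ <;> simp_all

-- ===== PORT B =====
def pvBuildRows (cur : List Int) : List (List Int) :=
  if cur.any (fun d => d ≠ 0) then
    cur :: pvBuildRows ((cur.zip cur.tail).map (fun p => p.2 - p.1))
  else
    [cur]
termination_by cur.length
decreasing_by
  simp only [List.length_map, List.length_zip, List.length_tail]
  rcases cur with _ | ⟨a, t⟩ <;> simp_all

def pvExtStep (p : List (List Int) × Int) (row : List Int) : List (List Int) × Int :=
  let acc := row.getLast! + p.2
  (p.1 ++ [row ++ [acc]], acc)

def build_ext_pyramid_alt (number_list : List Int) : List (List Int) :=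
  let rows := pvBuildRows number_list
  let out := (rows.dropLast.reverse).foldl pvExtStep ([rows.getLast! ++ [0]], 0)
  out.1.reverse

-- ===== PRECONDITION & SPEC =====
def Spec_build_ext_pyramid (number_list : List Int) (out : List (List Int)) : Prop := out = build_ext_pyramid_alt number_list
instance (number_list : List Int) (out : List (List Int)) : Decidable (Spec_build_ext_pyramid number_list out) := by unfold Spec_build_ext_pyramid; infer_instance

-- ===== CLAIM (what is proved, stated in full; the proofs are below) =====
def Claim_equal_build_ext_pyramid : Prop := ∀ (number_list : List Int), Dom_build_ext_pyramid number_list → Spec_build_ext_pyramid number_list (build_ext_pyramid number_list)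

-- ===== LEMMAS AND PROOFS =====

lemma pv_head_bang_reverse (l : List (List Int)) : l.reverse.head! = l.getLast! := by
  rcases hr : l.reverse with _ | ⟨a, t⟩
  · rw [List.reverse_eq_nil_iff] at hr; subst hr; rfl
  · rcases l with _ | ⟨x, xs⟩
    · simp at hr
    · have h2 : (x :: xs).getLast? = some a := by rw [← List.head?_reverse, hr]; rfl
      rw [List.getLast?_eq_some_getLast (by simp)] at h2
      simp [List.head!, List.getLast!]
      exact (Option.some_inj.mp h2).symm

lemma pv_zip_dropLast_tail (nl : List Int) :
    nl.dropLast.zip nl.tail = nl.zip nl.tail := by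
  induction nl with
  | nil => rfl
  | cons a t ih =>
    cases t with
    | nil => rfl
    | cons b u =>
      simp only [List.tail_cons] at ih ⊢
      show (a :: (b :: u).dropLast).zip (b :: u) = (a :: b :: u).zip (b :: u)
      rw [List.zip_cons_cons, List.zip_cons_cons, ih]

lemma pv_buildRows_ne_nil (l : List Int) : pvBuildRows l ≠ [] := by
  rw [pvBuildRows]; split <;> simp

lemma pv_fold_inv (rows : List (List Int)) :
    ∀ p : List (List Int) × Int, p.1.getLast!.getLast! = p.2 →
      (rows.foldl pvExtStep p).1.getLast!.getLast! = (rows.foldl pvExtStep p).2 := by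
  induction rows with
  | nil => intro p h; exact h
  | cons r rs ih =>
    intro p h
    simp only [List.foldl_cons]
    apply ih
    simp [pvExtStep]

lemma pv_alt_unfold (nl : List Int) :
    build_ext_pyramid_alt nl =
      if nl.any (fun d => d ≠ 0) then
        (nl ++ [nl.getLast! +
            (build_ext_pyramid_alt ((nl.zip nl.tail).map (fun p => p.2 - p.1))).head!.getLast!])
          :: build_ext_pyramid_alt ((nl.zip nl.tail).map (fun p => p.2 - p.1))
      else [nl ++ [0]] := by
  by_cases h : nl.any (fun d => d ≠ 0)
  · rw [if_pos h]
    obtain ⟨r, rs, hR⟩ : ∃ r rs,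
        pvBuildRows ((nl.zip nl.tail).map (fun p => p.2 - p.1)) = r :: rs := by
      rcases hE : pvBuildRows ((nl.zip nl.tail).map (fun p => p.2 - p.1)) with _ | ⟨r, rs⟩
      · exact absurd hE (pv_buildRows_ne_nil _)
      · exact ⟨r, rs, hE⟩
    have hrows : pvBuildRows nl = nl :: r :: rs := by
      rw [pvBuildRows, if_pos h, hR]
    unfold build_ext_pyramid_alt
    rw [hrows, hR]
    show (List.foldl pvExtStep ([(nl :: r :: rs).getLast! ++ [0]], 0)
        (nl :: r :: rs).dropLast.reverse).1.reverse = _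
    have hgl : (nl :: r :: rs).getLast! = (r :: rs).getLast! := by simp [List.getLast!]
    have hdrop : (nl :: r :: rs).dropLast = nl :: (r :: rs).dropLast := rfl
    rw [hgl, hdrop, List.reverse_cons, List.foldl_append]
    set P := ((r :: rs).dropLast.reverse).foldl pvExtStep ([(r :: rs).getLast! ++ [0]], 0) with hP
    have hPinv : P.1.getLast!.getLast! = P.2 := by
      apply pv_fold_inv
      simp
    show (List.foldl pvExtStep P [nl]).1.reverse =
        (nl ++ [nl.getLast! + P.1.reverse.head!.getLast!]) :: P.1.reverse
    rw [pv_head_bang_reverse, hPinv]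
    simp [pvExtStep]
  · rw [if_neg h]
    unfold build_ext_pyramid_alt
    rw [pvBuildRows, if_neg h]
    simp

lemma pv_main (nl : List Int) : build_ext_pyramid_alt nl = build_ext_pyramid nl := by
  rw [pv_alt_unfold, build_ext_pyramid]
  by_cases h : nl.any (fun d => d ≠ 0)
  · have hfilter : ¬ (nl.filter (fun d => d ≠ 0)).length = 0 := by
      simp only [List.any_eq_true] at h
      simp only [List.length_eq_zero_iff, List.filter_eq_nil_iff]
      push Not
      simpa using h
    rw [if_pos h, if_neg hfilter, pv_zip_dropLast_tail, pv_main ((nl.zip nl.tail).map (fun p => p.2 - p.1))]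
  · have hfilter : (nl.filter (fun d => d ≠ 0)).length = 0 := by
      simp only [List.any_eq_true] at h
      simp only [List.length_eq_zero_iff, List.filter_eq_nil_iff]
      intro x hx
      simp only [not_exists, not_and] at h
      simpa using h x hx
    rw [if_neg h, if_pos hfilter]
termination_by nl.length
decreasing_by
  simp only [List.length_map, List.length_zip, List.length_tail]
  rcases nl with _ | ⟨a, t⟩ <;> simp_all

-- ===== VERDICT (by name: the statement is the Claim_ definition above) =====
theorem build_ext_pyramid_spec : Claim_equal_build_ext_pyramid := by
  intro nl _
  unfold Spec_build_ext_pyramid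
  exact (pv_main nl).symm
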